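-- pv_equiv track=rewrite | github.com/jchew8278-spec/PanQianMing_Bazi_Assistant | data/data/main.py | name_to_number
-- ===== SOURCE A (Python) =====
-- LETTER_TO_NUMBER = {
--     'A':1,'B':2,'C':3,'D':4,'E':5,'F':6,'G':7,'H':8,'I':9,
--     'J':1,'K':2,'L':3,'M':4,'N':5,'O':6,'P':7,'Q':8,'R':9,
--     'S':1,'T':2,'U':3,'V':4,'W':5,'X':6,'Y':7,'Z':8
-- }
--
-- def reduce_number_keep_master(n):
--     if n in (11,22):
--         return n
--     while n > 9:
--         s = sum(int(d) for d in str(n))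
--         if s in (11,22):
--             return s
--         n = s
--     return n
--
-- def name_to_number(name):
--     total = 0
--     for ch in name.upper():
--         if ch in LETTER_TO_NUMBER:
--             total += LETTER_TO_NUMBER[ch]
--     if total == 0:
--         return None
--     return reduce_number_keep_master(total)
-- ===== SOURCE B (Python) =====
-- def _digit_sum(n):
--     return 0 if n <= 0 else n % 10 + _digit_sum(n // 10)
--
--
-- def _reduce(n):
--     if n <= 9 or n in (11, 22):
--         return n
--     return _reduce(_digit_sum(n))
--
--
-- def name_to_number(name):
--     total = sum((ord(c) - 65) % 9 + 1 for c in name.upper() if 'A' <= c <= 'Z')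
--     if total == 0:
--         return None
--     return _reduce(total)
-- ===== Notes on version B (the rewrite author's own statement) =====
-- stated objective: alternative
-- what changed: Replaces the 26-entry letter dict with the closed-form value ((ord(c)-65)%9+1) over a filtered comprehension, computes digit sums arithmetically (%10, //10) instead of via str(n), and turns the while-loop numerology reduction into a recursion.
import Mathlib
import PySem

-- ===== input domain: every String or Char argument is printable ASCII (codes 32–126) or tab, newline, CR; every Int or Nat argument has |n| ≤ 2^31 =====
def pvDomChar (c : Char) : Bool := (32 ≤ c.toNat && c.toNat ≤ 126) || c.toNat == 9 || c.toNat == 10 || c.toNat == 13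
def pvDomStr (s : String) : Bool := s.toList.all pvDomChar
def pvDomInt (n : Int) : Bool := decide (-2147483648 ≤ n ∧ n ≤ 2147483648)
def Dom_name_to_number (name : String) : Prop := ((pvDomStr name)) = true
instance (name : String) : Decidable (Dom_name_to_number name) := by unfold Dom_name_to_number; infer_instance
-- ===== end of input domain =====

-- B replaces the letter dict by closed-form arithmetic, the str(n) digit sum by %10-//10 arithmetic,
-- and the while-loop reduction by a recursion (objective: alternative decomposition, same cost).


-- Helper cited by the ports' termination proofs: the plain decimal digit sum on Nat.
def pvDsNat (m : Nat) : Nat :=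
  if h : m = 0 then 0 else m % 10 + pvDsNat (m / 10)
decreasing_by exact Nat.div_lt_self (Nat.pos_of_ne_zero h) (by omega)

theorem pvDsNat_le (m : Nat) : pvDsNat m ≤ m := by
  induction m using Nat.strong_induction_on with
  | _ m ih =>
    rw [pvDsNat]
    split
    · omega
    · have h10 : m / 10 < m := Nat.div_lt_self (Nat.pos_of_ne_zero ‹_›) (by omega)
      have := ih (m / 10) h10
      omega

theorem pvDsNat_lt (m : Nat) (h : 10 ≤ m) : pvDsNat m < m := by
  rw [pvDsNat]
  split
  · omega
  · have := pvDsNat_le (m / 10)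
    omega

-- int(d) on a one-character string (exact; only digit characters are reached by port A).
def pvCharVal (c : Char) : Int := (PySem.Int.ofChars? [c]).getD 0

theorem pvCharVal_digitChar (r : Nat) (h : r < 10) : pvCharVal r.digitChar = (r : Int) := by
  interval_cases r <;> decide

theorem pvToDigitsCore_sum (fuel : Nat) : ∀ (m : Nat) (acc : List Char), m < fuel →
    ((Nat.toDigitsCore 10 fuel m acc).map pvCharVal).sum = (pvDsNat m : Int) + (acc.map pvCharVal).sum := by
  induction fuel with
  | zero => intro m acc h; omega
  | succ f ih =>
    intro m acc h
    rw [Nat.toDigitsCore]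
    by_cases h0 : m / 10 = 0
    · have hm : m < 10 := by omega
      simp only [h0, if_pos]
      rw [List.map_cons, List.sum_cons, pvCharVal_digitChar _ (Nat.mod_lt m (by omega))]
      rw [pvDsNat]
      split
      · simp_all
      · rw [pvDsNat, h0, dif_pos rfl]
        push_cast
        ring
    · simp only [h0, if_false]
      have hm10 : 10 ≤ m := by
        by_contra hc
        exact h0 (Nat.div_eq_of_lt (by omega))
      rw [ih (m / 10) _ (by omega)]
      rw [List.map_cons, List.sum_cons, pvCharVal_digitChar _ (Nat.mod_lt m (by omega))]
      conv_rhs => rw [pvDsNat, dif_neg (by omega : ¬ m = 0)]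
      push_cast
      ring

-- A's per-step digit sum sum(int(d) for d in str(n)) equals pvDsNat on nonnegative n.
theorem pvStrDigitSum_eq (n : Int) (h : 0 ≤ n) :
    ((PySem.Int.toChars n).map pvCharVal).sum = (pvDsNat n.toNat : Int) := by
  rw [PySem.Int.toChars, if_neg (by omega : ¬ n < 0), Nat.toDigits]
  rw [pvToDigitsCore_sum (n.toNat + 1) n.toNat [] (by omega)]
  simp

-- ===== PORT A =====
def LETTER_TO_NUMBER : PySem.Dict Char Int := PySem.Dict.ofList
  [('A',1),('B',2),('C',3),('D',4),('E',5),('F',6),('G',7),('H',8),('I',9),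
   ('J',1),('K',2),('L',3),('M',4),('N',5),('O',6),('P',7),('Q',8),('R',9),
   ('S',1),('T',2),('U',3),('V',4),('W',5),('X',6),('Y',7),('Z',8)]

-- the 'while n > 9' loop of reduce_number_keep_master, step for step
def pvReduceLoop (n : Int) : Int :=
  if _h : 9 < n then
    let s := ((PySem.Int.toChars n).map pvCharVal).sum
    if s = 11 ∨ s = 22 then s else pvReduceLoop s
  else n
termination_by n.toNat
decreasing_by
  rw [pvStrDigitSum_eq n (by omega)]
  have h1 := pvDsNat_lt n.toNat (by omega)
  omega

def reduce_number_keep_master (n : Int) : Int :=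
  if n = 11 ∨ n = 22 then n else pvReduceLoop n

def name_to_number (name : String) : Option Int :=
  -- total = 0; for ch in name.upper(): if ch in LETTER_TO_NUMBER: total += LETTER_TO_NUMBER[ch]
  -- (the [ch] lookup is guarded by the membership test, so getD 0 is exact)
  let total := (PySem.Chars.upper name.toList).foldl
    (fun t ch => if LETTER_TO_NUMBER.contains ch then t + LETTER_TO_NUMBER.getD ch 0 else t) 0
  if total = 0 then none else some (reduce_number_keep_master total)

-- ===== PORT B =====
def pvDigitSumAlt (n : Int) : Int :=
  if n ≤ 0 then 0 else PySem.Int.mod n 10 + pvDigitSumAlt (PySem.Int.floordiv n 10)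
termination_by n.toNat
decreasing_by
  rw [PySem.Int.floordiv_eq_ediv_of_pos (by omega)]
  omega

-- cited by pvReduceAlt's termination proof: _digit_sum computes pvDsNat on nonnegative input
theorem pvDigitSumAlt_eq_aux (k : Nat) : ∀ (n : Int), 0 ≤ n → n.toNat ≤ k →
    pvDigitSumAlt n = (pvDsNat n.toNat : Int) := by
  induction k with
  | zero =>
    intro n h0 hk
    have hn : n = 0 := by omega
    subst hn
    rw [pvDigitSumAlt, if_pos (by omega), pvDsNat]
    simp
  | succ k ih =>
    intro n h0 hk
    rw [pvDigitSumAlt]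
    by_cases hz : n ≤ 0
    · have hn0 : n.toNat = 0 := by omega
      rw [if_pos hz, hn0, pvDsNat]
      simp
    · rw [if_neg hz, PySem.Int.mod_eq_emod_of_pos (by omega), PySem.Int.floordiv_eq_ediv_of_pos (by omega)]
      rw [ih (n / 10) (by omega) (by omega)]
      conv_rhs => rw [pvDsNat, dif_neg (by omega : ¬ n.toNat = 0)]
      have h1 : (n / 10).toNat = n.toNat / 10 := by omega
      have h2 : n % 10 = (n.toNat % 10 : Int) := by omega
      rw [h1, h2]
      push_cast
      ring

theorem pvDigitSumAlt_eq (n : Int) (h : 0 ≤ n) : pvDigitSumAlt n = (pvDsNat n.toNat : Int) :=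
  pvDigitSumAlt_eq_aux n.toNat n h le_rfl

def pvReduceAlt (n : Int) : Int :=
  if n ≤ 9 ∨ n = 11 ∨ n = 22 then n else pvReduceAlt (pvDigitSumAlt n)
termination_by n.toNat
decreasing_by
  rw [pvDigitSumAlt_eq n (by omega)]
  have h1 := pvDsNat_lt n.toNat (by omega)
  omega

def name_to_number_alt (name : String) : Option Int :=
  let total := (((PySem.Chars.upper name.toList).filter
      (fun c => decide ('A' ≤ c ∧ c ≤ 'Z'))).map
      (fun c => PySem.Int.mod ((c.toNat : Int) - 65) 9 + 1)).sum
  if total = 0 then none else some (pvReduceAlt total)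

-- ===== PRECONDITION & SPEC =====
def Spec_name_to_number (name : String) (out : Option Int) : Prop := out = name_to_number_alt name
instance (name : String) (out : Option Int) : Decidable (Spec_name_to_number name out) := by unfold Spec_name_to_number; infer_instance

-- ===== CLAIM (what is proved, stated in full; the proofs are below) =====
def Claim_equal_name_to_number : Prop := ∀ (name : String), Dom_name_to_number name → Spec_name_to_number name (name_to_number name)

-- ===== LEMMAS AND PROOFS =====

theorem pv_guard_iff (c : Char) : ('A' ≤ c ∧ c ≤ 'Z') ↔ (65 ≤ c.toNat ∧ c.toNat ≤ 90) := by
  constructor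
  · rintro ⟨h1, h2⟩
    simp [Char.le_def, UInt32.le_iff_toNat_le] at h1 h2
    exact ⟨h1, h2⟩
  · rintro ⟨h1, h2⟩
    constructor <;> simp [Char.le_def, UInt32.le_iff_toNat_le] <;> omega

theorem pv_char_enum (c : Char) (h1 : 65 ≤ c.toNat) (h2 : c.toNat ≤ 90) :
    c ∈ ['A','B','C','D','E','F','G','H','I','J','K','L','M',
         'N','O','P','Q','R','S','T','U','V','W','X','Y','Z'] := by
  rw [← Char.ofNat_toNat c]
  generalize hm : c.toNat = m at h1 h2
  interval_cases m <;> decide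

theorem pv_per_char (c : Char) :
    (if LETTER_TO_NUMBER.contains c then LETTER_TO_NUMBER.getD c 0 else 0) =
    (if 'A' ≤ c ∧ c ≤ 'Z' then PySem.Int.mod ((c.toNat : Int) - 65) 9 + 1 else 0) := by
  by_cases h : 'A' ≤ c ∧ c ≤ 'Z'
  · obtain ⟨h1, h2⟩ := (pv_guard_iff c).1 h
    have hm := pv_char_enum c h1 h2
    fin_cases hm <;> decide
  · rw [if_neg h, if_neg ?_]
    intro hcont
    have hmem : c ∈ LETTER_TO_NUMBER.keys := (PySem.Dict.contains_iff_mem_keys _ _).1 hcont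
    have hk : LETTER_TO_NUMBER.keys = ['A','B','C','D','E','F','G','H','I','J','K','L','M',
        'N','O','P','Q','R','S','T','U','V','W','X','Y','Z'] := by decide
    rw [hk] at hmem
    apply h
    rw [pv_guard_iff]
    fin_cases hmem <;> decide

theorem pv_fold_eq (L : List Char) : ∀ (t : Int),
    L.foldl (fun t ch => if LETTER_TO_NUMBER.contains ch then t + LETTER_TO_NUMBER.getD ch 0 else t) t =
    t + ((L.filter (fun c => decide ('A' ≤ c ∧ c ≤ 'Z'))).map
      (fun c => PySem.Int.mod ((c.toNat : Int) - 65) 9 + 1)).sum := by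
  induction L with
  | nil => intro t; simp
  | cons c L ih =>
    intro t
    have key : (if LETTER_TO_NUMBER.contains c then t + LETTER_TO_NUMBER.getD c 0 else t) =
        t + (if 'A' ≤ c ∧ c ≤ 'Z' then PySem.Int.mod ((c.toNat : Int) - 65) 9 + 1 else 0) := by
      rw [← pv_per_char c]
      by_cases hc : LETTER_TO_NUMBER.contains c <;> simp [hc]
    rw [List.foldl_cons, key, ih]
    by_cases h : 'A' ≤ c ∧ c ≤ 'Z'
    · rw [if_pos h, List.filter_cons_of_pos (by simpa using h), List.map_cons, List.sum_cons]
      ring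
    · rw [if_neg h, List.filter_cons_of_neg (by simpa using h)]
      ring

theorem pv_reduce_eq (k : Nat) : ∀ (n : Int), n.toNat ≤ k → 0 ≤ n → n ≠ 11 → n ≠ 22 →
    pvReduceLoop n = pvReduceAlt n := by
  induction k with
  | zero =>
    intro n hk h0 _ _
    have hn : n = 0 := by omega
    rw [pvReduceLoop, pvReduceAlt, hn]
    norm_num
  | succ k ih =>
    intro n hk h0 h11 h22
    rw [pvReduceLoop, pvReduceAlt]
    by_cases h9 : 9 < n
    · rw [dif_pos h9, if_neg (by omega : ¬ (n ≤ 9 ∨ n = 11 ∨ n = 22))]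
      rw [pvStrDigitSum_eq n (by omega), ← pvDigitSumAlt_eq n (by omega)]
      set s := pvDigitSumAlt n with hs
      have hse : s = (pvDsNat n.toNat : Int) := pvDigitSumAlt_eq n (by omega)
      have hlt : pvDsNat n.toNat < n.toNat := pvDsNat_lt n.toNat (by omega)
      by_cases hm : s = 11 ∨ s = 22
      · rw [if_pos hm, pvReduceAlt, if_pos (by omega : s ≤ 9 ∨ s = 11 ∨ s = 22)]
      · rw [if_neg hm]
        push_neg at hm
        exact ih s (by omega) (by omega) hm.1 hm.2
    · rw [dif_neg h9, if_pos (by omega : n ≤ 9 ∨ n = 11 ∨ n = 22)]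

theorem pv_sum_nonneg (L : List Char) :
    0 ≤ ((L.filter (fun c => decide ('A' ≤ c ∧ c ≤ 'Z'))).map
      (fun c => PySem.Int.mod ((c.toNat : Int) - 65) 9 + 1)).sum := by
  apply List.sum_nonneg
  intro x hx
  simp only [List.mem_map] at hx
  obtain ⟨c, _, rfl⟩ := hx
  have := PySem.Int.mod_nonneg ((c.toNat : Int) - 65) (b := 9) (by omega)
  omega

-- ===== VERDICT (by name: the statement is the Claim_ definition above) =====
theorem name_to_number_spec : Claim_equal_name_to_number := by
  intro name _
  unfold Spec_name_to_number name_to_number name_to_number_alt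
  rw [pv_fold_eq]
  set L := PySem.Chars.upper name.toList
  set total := ((L.filter (fun c => decide ('A' ≤ c ∧ c ≤ 'Z'))).map
      (fun c => PySem.Int.mod ((c.toNat : Int) - 65) 9 + 1)).sum with ht
  simp only [zero_add]
  by_cases h0 : total = 0
  · simp [h0]
  · have hnn : 0 ≤ total := pv_sum_nonneg L
    rw [if_neg h0, if_neg h0]
    congr 1
    unfold reduce_number_keep_master
    by_cases hm : total = 11 ∨ total = 22
    · rw [if_pos hm, pvReduceAlt, if_pos (by omega : total ≤ 9 ∨ total = 11 ∨ total = 22)]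
    · push_neg at hm
      rw [if_neg (by tauto)]
      exact pv_reduce_eq total.toNat total le_rfl hnn hm.1 hm.2
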